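-- pv_equiv track=rewrite | github.com/sproutsai-engg/coding_question_generator | json_files/python_codes/Q_1403.py | min_changes_to_divide_string
-- ===== SOURCE A (Python) =====
-- def min_changes_to_divide_string(s, k):
--     n = len(s)
--     if n % k != 0:
--         return -1
--     chunk_count = n // k
--     res = 0
--     for i in range(k):
--         counts = [0] * 26
--         for j in range(i, n, k):
--             counts[ord(s[j]) - ord('a')] += 1
--         max_count = max(counts)
--         res += chunk_count - max_count
--     return res
-- ===== SOURCE B (Python) =====
-- def min_changes_to_divide_string(s, k):
--     n = len(s)
--     if n % k != 0:
--         return -1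
--     chunk_count = n // k
--     # cut the string into its chunk_count chunks, transpose, and for each
--     # transposed column sort it and take the longest run of equal characters
--     chunks = [s[t * k:(t + 1) * k] for t in range(chunk_count)]
--     res = 0
--     for col in zip(*chunks):
--         best = 0
--         run = 0
--         prev = None
--         for c in sorted(col):
--             run = run + 1 if c == prev else 1
--             prev = c
--             best = max(best, run)
--         res += chunk_count - best
--     return res
-- ===== Notes on version B (the rewrite author's own statement) =====
-- stated objective: alternative
-- what changed: B cuts the string into its chunk_count chunks, transposes them, and for each transposed column sorts it and takes the longest run of equal characters (sort-then-scan), instead of A's 26-slot counting array rebuilt for each of k strided scans; Pre_ excludes k = 0 (both raise ZeroDivisionError) and, when k >= 1 divides len(s), strings with characters outside 'a'..'z', which are outside the task's natural lowercase domain: there A raises IndexError on codes outside 71..122 and on codes 71..96 returns counts produced by negative-index wraparound that conflates e.g. 'G' with 'a'.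
-- outside the precondition, e.g. on min_changes_to_divide_string('Ga', 1): A returns 0, B returns 1; on min_changes_to_divide_string('zz{', 3): A raises IndexError, B returns 0
import Mathlib
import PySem

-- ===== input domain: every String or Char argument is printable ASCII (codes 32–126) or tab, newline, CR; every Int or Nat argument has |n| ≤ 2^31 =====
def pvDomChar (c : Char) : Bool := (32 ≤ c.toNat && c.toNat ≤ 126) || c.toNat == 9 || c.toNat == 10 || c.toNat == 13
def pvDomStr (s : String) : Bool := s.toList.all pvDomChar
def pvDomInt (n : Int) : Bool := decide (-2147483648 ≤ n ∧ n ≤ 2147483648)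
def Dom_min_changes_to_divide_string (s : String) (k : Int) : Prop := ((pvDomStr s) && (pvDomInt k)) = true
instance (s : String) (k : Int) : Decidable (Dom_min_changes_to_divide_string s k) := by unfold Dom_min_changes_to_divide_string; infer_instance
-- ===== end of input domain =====

-- B replaces A's 26-slot counting array over k strided scans by chunking + transposing the
-- string and sort-then-longest-run per column (alternative algorithm, similar cost).


-- ===== PORT A =====
-- counts[idx] += 1  (Python negative index wraps; in-range under Pre_'s lowercase bound)
def pvIncr (counts : List Int) (idx : Int) : List Int :=
  PySem.List.pySetD counts idx (PySem.List.pyGetD counts idx 0 + 1)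

-- one loop body: counts[ord(s[j]) - ord('a')] += 1
def pvStep (cs : List Char) (counts : List Int) (j : Int) : List Int :=
  pvIncr counts (((PySem.List.pyGetD cs j 'a').toNat : Int) - 97)

def min_changes_to_divide_string (s : String) (k : Int) : Int :=
  let cs := s.toList
  let n : Int := PySem.List.len cs
  if PySem.Int.mod n k ≠ 0 then -1
  else
    let chunkCount := PySem.Int.floordiv n k
    (PySem.List.pyRange 0 k 1).foldl
      (fun res i =>
        let counts := (PySem.List.pyRange i n k).foldl (pvStep cs) (List.replicate 26 0)
        let maxCount := PySem.List.maxD counts (fun x => x) 0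
        res + (chunkCount - maxCount)) 0

-- ===== PORT B =====
-- run = run + 1 if c == prev else 1; prev = c; best = max(best, run)   (state (best, run, prev))
def pvRunStep (st : Int × Int × Option Char) (c : Char) : Int × Int × Option Char :=
  let r := if st.2.2 = some c then st.2.1 + 1 else 1
  (max st.1 r, r, some c)

-- zip(*chunks): columns until the shortest chunk runs out (hand port, exact for zip of
-- lists; structural recursion on the first chunk)
def pvZipGo : List Char → List (List Char) → List (List Char)
  | [], _ => []
  | c :: l', rest =>
    if rest.any (·.isEmpty) then []
    else (c :: rest.map (fun t => t.headD 'a')) :: pvZipGo l' (rest.map (fun t => t.tail))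

def pvZip (ls : List (List Char)) : List (List Char) :=
  match ls with
  | [] => []
  | l :: rest => pvZipGo l rest

def min_changes_to_divide_string_alt (s : String) (k : Int) : Int :=
  let cs := s.toList
  let n : Int := PySem.List.len cs
  if PySem.Int.mod n k ≠ 0 then -1
  else
    let cc := PySem.Int.floordiv n k
    let chunks := (PySem.List.pyRange 0 cc 1).map
      (fun t => PySem.List.slice cs (some (t * k)) (some ((t + 1) * k)))
    (pvZip chunks).foldl
      (fun res col =>
        res + (cc - ((PySem.List.sorted col (fun c => c) false).foldl pvRunStep
                       ((0 : Int), (0 : Int), (none : Option Char))).1)) 0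

-- ===== PRECONDITION & SPEC =====
-- Pre_ excludes k = 0 (both raise ZeroDivisionError) and, when k ≥ 1 divides len(s), strings
-- with characters outside 'a'..'z' — outside the task's natural lowercase domain: there A
-- raises IndexError on codes outside 71..122, and on codes 71..96 returns counts produced by
-- negative-index wraparound that conflates e.g. 'G' with 'a'.
def Pre_min_changes_to_divide_string (s : String) (k : Int) : Prop :=
  k ≠ 0 ∧ (PySem.Int.mod (PySem.List.len s.toList) k = 0 → 1 ≤ k →
    s.toList.all (fun c => 97 ≤ c.toNat && c.toNat ≤ 122) = true)
instance (s : String) (k : Int) : Decidable (Pre_min_changes_to_divide_string s k) := by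
  unfold Pre_min_changes_to_divide_string; infer_instance

def pvWitness_min_changes_to_divide_string : String × Int := ("abab", 2)

def Spec_min_changes_to_divide_string (s : String) (k : Int) (out : Int) : Prop := out = min_changes_to_divide_string_alt s k
instance (s : String) (k : Int) (out : Int) : Decidable (Spec_min_changes_to_divide_string s k out) := by unfold Spec_min_changes_to_divide_string; infer_instance

-- ===== CLAIM (what is proved, stated in full; the proofs are below) =====
def Claim_equal_min_changes_to_divide_string : Prop := ∀ (s : String) (k : Int), Dom_min_changes_to_divide_string s k → Pre_min_changes_to_divide_string s k → Spec_min_changes_to_divide_string s k (min_changes_to_divide_string s k)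

-- ===== LEMMAS AND PROOFS =====

-- maximal multiplicity of an element of l (the quantity both programs compute per class)
def pvMc (l : List Char) : Nat := l.foldl (fun m c => max m (l.count c)) 0

-- generic facts about a running max of a projection (Nat accumulator)
lemma pv_foldl_max_le {α : Type} (xs : List α) (f : α → Nat) (a B : Nat)
    (ha : a ≤ B) (h : ∀ x ∈ xs, f x ≤ B) :
    xs.foldl (fun m x => max m (f x)) a ≤ B := by
  induction xs generalizing a with
  | nil => exact ha
  | cons x t ih =>
      exact ih _ (max_le ha (h x (by simp))) (fun y hy => h y (by simp [hy]))

lemma pv_foldl_max_attained {α : Type} (xs : List α) (f : α → Nat) (a : Nat) :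
    xs.foldl (fun m x => max m (f x)) a = a ∨
      ∃ x ∈ xs, xs.foldl (fun m x => max m (f x)) a = f x := by
  induction xs generalizing a with
  | nil => exact Or.inl rfl
  | cons x t ih =>
      rcases ih (max a (f x)) with h | ⟨y, hy, h⟩
      · simp only [List.foldl_cons] at *
        rcases Nat.le_total a (f x) with hle | hle
        · exact Or.inr ⟨x, by simp, by rw [h]; omega⟩
        · exact Or.inl (by rw [h]; omega)
      · exact Or.inr ⟨y, by simp [hy], by simpa using h⟩

lemma pv_le_Mc {c : Char} {l : List Char} (hc : c ∈ l) : l.count c ≤ pvMc l := by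
  exact (PySem.List.le_foldl_max_nat l (fun c => l.count c) 0).2 c hc

lemma pv_Mc_le {l : List Char} {B : Nat} (h : ∀ c ∈ l, l.count c ≤ B) : pvMc l ≤ B :=
  pv_foldl_max_le l _ 0 B (Nat.zero_le B) h

lemma pv_Mc_perm {l l' : List Char} (hp : l.Perm l') : pvMc l = pvMc l' := by
  apply Nat.le_antisymm
  · exact pv_Mc_le (fun c hc => by
      rw [hp.count_eq]; exact pv_le_Mc (hp.mem_iff.mp hc))
  · exact pv_Mc_le (fun c hc => by
      rw [← hp.count_eq]; exact pv_le_Mc (hp.mem_iff.mpr hc))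

lemma pv_Mc_snoc (l : List Char) (c : Char) :
    pvMc (l ++ [c]) = max (pvMc l) (l.count c + 1) := by
  apply Nat.le_antisymm
  · apply pv_Mc_le
    intro x hx
    by_cases hxc : x = c
    · subst hxc; simp
    · have hxl : x ∈ l := by
        rcases List.mem_append.mp hx with h | h
        · exact h
        · simp at h; exact absurd h hxc
      have : (l ++ [c]).count x = l.count x := by
        simp [List.count_append, List.count_singleton]
        exact fun h => hxc (Eq.symm h)
      rw [this]
      exact le_max_of_le_left (pv_le_Mc hxl)
  · apply max_le
    · apply pv_Mc_le
      intro x hx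
      calc l.count x ≤ (l ++ [c]).count x := by simp [List.count_append]
        _ ≤ pvMc (l ++ [c]) := pv_le_Mc (by simp [hx])
    · have : (l ++ [c]).count c = l.count c + 1 := by simp [List.count_append]
      rw [← this]
      exact pv_le_Mc (by simp)

-- B's run-length fold on a sorted list computes the maximal multiplicity
lemma pv_char_inj {a b : Char} (h : a.toNat = b.toNat) : a = b :=
  Char.ext (UInt32.toNat_inj.mp h)

lemma pv_run_fold (l : List Char) (c : Char) (hs : (l ++ [c]).Pairwise (· ≤ ·)) :
    ((l ++ [c]).foldl pvRunStep ((0 : Int), (0 : Int), (none : Option Char))) =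
      (((pvMc (l ++ [c]) : Nat) : Int), (((l ++ [c]).count c : Nat) : Int), some c) := by
  induction l using List.reverseRecOn generalizing c with
  | nil =>
      simp [pvRunStep, pvMc]
  | append_singleton l b ih =>
      have hsl : (l ++ [b]).Pairwise (· ≤ ·) :=
        ((List.pairwise_append).mp hs).1
      have hble : ∀ x ∈ l ++ [b], x ≤ c := by
        intro x hx
        exact ((List.pairwise_append).mp hs).2.2 x hx c (by simp)
      rw [List.foldl_append, List.foldl_cons, List.foldl_nil, ih b hsl]
      by_cases hbc : b = c
      · subst hbc
        have hcnt : ((l ++ [b]) ++ [b]).count b = (l ++ [b]).count b + 1 := by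
          simp [List.count_append]
        have hmc : pvMc ((l ++ [b]) ++ [b]) = max (pvMc (l ++ [b])) ((l ++ [b]).count b + 1) :=
          pv_Mc_snoc _ _
        have hMle : ((l ++ [b]).count b : Int) ≤ (pvMc (l ++ [b]) : Nat) := by
          exact_mod_cast pv_le_Mc (by simp : b ∈ l ++ [b])
        simp only [pvRunStep, hcnt, hmc]
        simp
      · have hnotmem : c ∉ l ++ [b] := by
          intro hcmem
          have h1 : c ≤ b := by
            rcases List.mem_append.mp hcmem with h | h
            · exact ((List.pairwise_append).mp hsl).2.2 c h b (by simp)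
            · simp at h; exact le_of_eq h
          have h2 : b ≤ c := hble b (by simp)
          exact hbc (le_antisymm h2 h1)
        have hcnt : ((l ++ [b]) ++ [c]).count c = 1 := by
          have h0 : (l ++ [b]).count c = 0 := List.count_eq_zero.mpr hnotmem
          rw [List.count_append, h0]; simp
        have hmc : pvMc ((l ++ [b]) ++ [c]) = max (pvMc (l ++ [b])) 1 := by
          rw [pv_Mc_snoc, List.count_eq_zero.mpr hnotmem]
        have hne : (some b : Option Char) ≠ some c := by simpa using hbc
        simp only [pvRunStep, hcnt, hmc]
        rw [if_neg hne]
        simp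

lemma pv_run_best (l : List Char) (hs : l.Pairwise (· ≤ ·)) :
    (l.foldl pvRunStep ((0 : Int), (0 : Int), (none : Option Char))).1 = ((pvMc l : Nat) : Int) := by
  rcases List.eq_nil_or_concat l with rfl | ⟨l', c, rfl⟩
  · simp [pvMc]
  · rw [List.concat_eq_append] at hs ⊢
    rw [pv_run_fold l' c hs]

-- A's counting fold over a lowercase list produces the per-letter countP table
def pvCount (counts : List Int) (c : Char) : List Int :=
  pvIncr counts ((c.toNat : Int) - 97)

lemma pv_counts_table (l : List Char) (g : Nat → Int)
    (h : ∀ c ∈ l, 97 ≤ c.toNat ∧ c.toNat ≤ 122) :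
    l.foldl pvCount ((List.range 26).map g) =
      (List.range 26).map (fun d => g d + (l.countP (fun c => c.toNat == 97 + d) : Int)) := by
  induction l generalizing g with
  | nil => simp
  | cons c t ih =>
      obtain ⟨hc1, hc2⟩ := h c (by simp)
      set D : Nat := c.toNat - 97 with hD
      have hD26 : D < 26 := by omega
      have hstep : pvCount ((List.range 26).map g) c =
          (List.range 26).map (fun d => if d = D then g D + 1 else g d) := by
        have hidx : ((c.toNat : Int) - 97) = (D : Int) := by omega
        have hlen : ((List.range 26).map g).length = 26 := by simp
        unfold pvCount pvIncr
        rw [hidx, PySem.List.pyGetD_natCast, PySem.List.pySetD_natCast]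
        apply List.ext_getElem
        · simp
        · intro i hi hi'
          simp only [List.length_set, hlen] at hi
          rw [List.getElem_set]
          have hgetD : ((List.range 26).map g).getD D 0 = g D := by
            rw [List.getD_eq_getElem _ _ (by simp [hD26])]
            simp
          simp only [List.getElem_map, List.getElem_range, hgetD]
          by_cases hiD : i = D
          · simp [hiD]
          · simp [hiD]
            exact fun e => absurd (Eq.symm e) hiD
      rw [List.foldl_cons, hstep, ih _ (fun x hx => h x (by simp [hx]))]
      apply List.map_congr_left
      intro d hd
      rw [List.mem_range] at hd
      have hcp : t.countP (fun c' => c'.toNat == 97 + d) + (if c.toNat = 97 + d then 1 else 0) =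
          (c :: t).countP (fun c' => c'.toNat == 97 + d) := by
        rw [List.countP_cons]
        simp
      by_cases hdD : d = D
      · rw [if_pos hdD, hdD]
        rw [hdD] at hcp
        have hcd : c.toNat = 97 + D := by omega
        rw [← hcp, if_pos hcd]
        push_cast; ring
      · have : ¬ (c.toNat = 97 + d) := by omega
        rw [if_neg hdD, ← hcp, if_neg this]
        push_cast; ring

-- the countP for a letter's code is the count of that letter
lemma pv_countP_eq_count {d : Nat} {l : List Char} {c : Char} (hc : c.toNat = 97 + d) :
    l.countP (fun x => x.toNat == 97 + d) = l.count c := by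
  rw [List.count]
  apply List.countP_congr
  intro x _
  constructor
  · intro hx
    have : x.toNat = c.toNat := by simp at hx; omega
    simp [pv_char_inj this]
  · intro hx
    have : x = c := by simpa using hx
    subst this; simp [hc]

lemma pv_maxD_eq_Mc (l : List Char) (h : ∀ c ∈ l, 97 ≤ c.toNat ∧ c.toNat ≤ 122) :
    PySem.List.maxD (l.foldl pvCount (List.replicate 26 0)) (fun x => x) 0 = ((pvMc l : Nat) : Int) := by
  have hrepl : (List.replicate 26 (0 : Int)) = (List.range 26).map (fun _ => (0 : Int)) := by
    simp [List.map_const']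
  rw [hrepl, pv_counts_table l _ h]
  set f : Nat → Int := fun d => (0 : Int) + (l.countP (fun c => c.toNat == 97 + d) : Int) with hf
  have hf_nonneg : ∀ d, 0 ≤ f d := by intro d; simp [hf]
  have hf_leMc : ∀ d, d < 26 → f d ≤ ((pvMc l : Nat) : Int) := by
    intro d _
    simp only [hf, zero_add, Nat.cast_le]
    by_cases hz : l.countP (fun c => c.toNat == 97 + d) = 0
    · simp [hz]
    · obtain ⟨c, hcl, hcp⟩ := List.countP_pos_iff.mp (Nat.pos_of_ne_zero hz)
      have hcc : c.toNat = 97 + d := by simpa using hcp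
      exact_mod_cast (pv_countP_eq_count hcc ▸ pv_le_Mc hcl : l.countP (fun x => x.toNat == 97 + d) ≤ pvMc l)
  -- the 26-entry table as head :: tail to apply max?_id_cons
  have hsplit : (List.range 26).map f = f 0 :: (List.range 25).map (fun d => f (d + 1)) := by
    rw [List.range_succ_eq_map]
    simp [Function.comp]
  rw [hsplit]
  unfold PySem.List.maxD
  rw [PySem.List.max?_id_cons]
  simp only [Option.getD_some]
  set t := (List.range 25).map (fun d => f (d + 1)) with ht
  apply le_antisymm
  · rcases PySem.List.foldl_max_mem t (f 0) with hmem | hmem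
    · rw [hmem]; exact hf_leMc 0 (by omega)
    · rw [ht] at hmem
      obtain ⟨d, hd, hfd⟩ := List.mem_map.mp hmem
      rw [List.mem_range] at hd
      rw [← hfd]
      exact hf_leMc (d + 1) (by omega)
  · rcases pv_foldl_max_attained l (fun c => l.count c) 0 with hz | ⟨c, hcl, hMc⟩
    · unfold pvMc
      rw [hz]
      simp
      exact (PySem.List.le_foldl_max t (f 0)).1.trans' (hf_nonneg 0)
    · obtain ⟨hc1, hc2⟩ := h c hcl
      have hcc : c.toNat = 97 + (c.toNat - 97) := by omega
      have hfval : f (c.toNat - 97) = ((pvMc l : Nat) : Int) := by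
        simp only [hf, zero_add]
        rw [pv_countP_eq_count hcc]
        unfold pvMc
        norm_cast
        exact hMc.symm
      by_cases h0 : c.toNat - 97 = 0
      · rw [← hfval, h0]
        exact (PySem.List.le_foldl_max t (f 0)).1
      · have hmem : f (c.toNat - 97) ∈ t := by
          rw [ht]
          apply List.mem_map.mpr
          exact ⟨c.toNat - 97 - 1, by rw [List.mem_range]; omega, by congr 1; omega⟩
        rw [← hfval]
        exact (PySem.List.le_foldl_max t (f 0)).2 _ hmem

-- B's per-column value: sorting then the run fold computes the maximal multiplicity
lemma pv_best_sorted (l : List Char) :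
    ((PySem.List.sorted l (fun c => c) false).foldl pvRunStep
        ((0 : Int), (0 : Int), (none : Option Char))).1 = ((pvMc l : Nat) : Int) := by
  rw [pv_run_best _ (PySem.List.sorted_pairwise l (fun c => c))]
  rw [pv_Mc_perm (PySem.List.sorted_perm l (fun c => c) false)]

-- the i-th chunk position's class of characters (positions i, i+K, …)
def pvClass (cs : List Char) (K C i : Nat) : List Char :=
  (List.range C).map (fun t => cs.getD (t * K + i) 'a')

lemma pv_getD_tail (t : List Char) (i : Nat) : t.tail.getD i 'a' = t.getD (i + 1) 'a' := by
  cases t <;> rfl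

lemma pv_headD (t : List Char) : t.headD 'a' = t.getD 0 'a' := by
  cases t <;> rfl

-- zip of a nonempty list of equal-length lists is the list of columns
lemma pv_zip_const (L : Nat) (ls : List (List Char)) (hne : ls ≠ [])
    (hl : ∀ x ∈ ls, x.length = L) :
    pvZip ls = (List.range L).map (fun i => ls.map (fun t => t.getD i 'a')) := by
  induction L generalizing ls with
  | zero =>
      match ls with
      | [] => exact absurd rfl hne
      | l :: rest =>
          have hl0 : l = [] := List.length_eq_zero_iff.mp (hl l (by simp))
          subst hl0
          rfl
  | succ L ih =>
      match ls with
      | [] => exact absurd rfl hne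
      | l :: rest =>
          match l, hl l (by simp) with
          | c :: l', _ =>
            have hrest : rest.any (·.isEmpty) = false := by
              rw [List.any_eq_false]
              intro x hx
              have hx1 := hl x (by simp [hx])
              cases x with
              | nil => simp at hx1
              | cons a t => simp
            show pvZipGo (c :: l') rest = _
            unfold pvZipGo
            rw [if_neg (by rw [hrest]; exact Bool.false_ne_true)]
            have htails : ∀ x ∈ l' :: rest.map (fun t => t.tail), x.length = L := by
              intro x hx
              rcases List.mem_cons.mp hx with rfl | hx
              · have := hl (c :: x) (by simp)
                simpa using this
              · obtain ⟨y, hy, rfl⟩ := List.mem_map.mp hx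
                rw [List.length_tail, hl y (by simp [hy])]
                omega
            have hrec : pvZipGo l' (rest.map (fun t => t.tail)) =
                pvZip (l' :: rest.map (fun t => t.tail)) := rfl
            rw [hrec, ih (l' :: rest.map (fun t => t.tail)) (by simp) htails]
            rw [List.range_succ_eq_map]
            simp only [List.map_cons, List.map_map]
            congr 1
            · congr 1
              apply List.map_congr_left
              intro t _
              exact pv_headD t
            · apply List.map_congr_left
              intro i _
              simp only [Function.comp]
              congr 1
              apply List.map_congr_left
              intro t _
              show t.tail.getD i 'a' = t.getD (i + 1) 'a'
              exact pv_getD_tail t i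

-- range(i, C*K, K) lists the class indices i + K*t, t < C
lemma pv_pyRange_stride (i K C : Nat) (hK : 1 ≤ K) (hi : i < K) :
    PySem.List.pyRange (i : Int) ((C * K : Nat) : Int) (K : Int) =
      (List.range C).map (fun (t : Nat) => (i : Int) + (K : Int) * (t : Int)) := by
  rw [PySem.List.pyRange_of_pos _ _ (by exact_mod_cast hK : (0 : Int) < (K : Int))]
  rcases Nat.eq_zero_or_pos C with rfl | hC
  · rw [if_neg (by push_cast; omega)]
  · rw [if_pos (by exact_mod_cast lt_of_lt_of_le hi (Nat.le_mul_of_pos_left K hC))]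
    have hKz : (K : Int) ≠ 0 := by exact_mod_cast (by omega : K ≠ 0)
    have hsub : ((K - 1 - i : Nat) : Int) = (K : Int) - 1 - (i : Int) := by omega
    have he : ((C * K : Nat) : Int) - (i : Int) + (K : Int) - 1 =
        ((K - 1 - i : Nat) : Int) + (C : Int) * (K : Int) := by
      rw [Nat.cast_mul]
      linarith [hsub]
    have harith : (((C * K : Nat) : Int) - (i : Int) + (K : Int) - 1) / (K : Int) = (C : Int) := by
      rw [he, Int.add_mul_ediv_right _ _ hKz,
        Int.ediv_eq_zero_of_lt (by positivity) (by exact_mod_cast (by omega : K - 1 - i < K))]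
      ring
    simp only [harith, Int.toNat_natCast]

lemma pv_zip_nil : pvZip [] = [] := by
  unfold pvZip
  rfl

lemma pv_class_lower (cs : List Char) (K C i : Nat) (hn : cs.length = C * K) (hi : i < K)
    (hall : cs.all (fun c => 97 ≤ c.toNat && c.toNat ≤ 122) = true) :
    ∀ c ∈ pvClass cs K C i, 97 ≤ c.toNat ∧ c.toNat ≤ 122 := by
  intro c hc
  obtain ⟨t, ht, rfl⟩ := List.mem_map.mp hc
  rw [List.mem_range] at ht
  have hmul : (t + 1) * K ≤ C * K := Nat.mul_le_mul_right K ht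
  have hexp : (t + 1) * K = t * K + K := by ring
  have hidx : t * K + i < cs.length := by omega
  rw [List.getD_eq_getElem _ _ hidx]
  have := List.all_eq_true.mp hall _ (List.getElem_mem hidx)
  simpa using this

-- A's per-class term: the strided count-array fold and its max
lemma pv_termA (cs : List Char) (K C i : Nat) (hK : 1 ≤ K) (hi : i < K)
    (hn : cs.length = C * K)
    (hall : cs.all (fun c => 97 ≤ c.toNat && c.toNat ≤ 122) = true) :
    PySem.List.maxD
        ((PySem.List.pyRange (i : Int) ((cs.length : Nat) : Int) (K : Int)).foldl (pvStep cs)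
          (List.replicate 26 0)) (fun x => x) 0 =
      ((pvMc (pvClass cs K C i) : Nat) : Int) := by
  have hrange : PySem.List.pyRange (i : Int) ((cs.length : Nat) : Int) (K : Int) =
      (List.range C).map (fun (t : Nat) => (i : Int) + (K : Int) * (t : Int)) := by
    rw [hn]
    exact pv_pyRange_stride i K C hK hi
  rw [hrange, List.foldl_map]
  have hcongr : ∀ (counts : List Int) (t : Nat), t ∈ List.range C →
      pvStep cs counts ((i : Int) + (K : Int) * (t : Int)) =
        pvCount counts (cs.getD (t * K + i) 'a') := by
    intro counts t _
    have hcast : (i : Int) + (K : Int) * (t : Int) = ((t * K + i : Nat) : Int) := by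
      push_cast; ring
    show pvCount counts (PySem.List.pyGetD cs ((i : Int) + (K : Int) * (t : Int)) 'a') = _
    rw [hcast, PySem.List.pyGetD_natCast]
  rw [PySem.List.foldl_congr_mem (List.range C) _
      (fun (counts : List Int) (t : Nat) => pvCount counts (cs.getD (t * K + i) 'a')) _ hcongr,
    ← List.foldl_map (f := fun t => cs.getD (t * K + i) 'a')]
  exact pv_maxD_eq_Mc _ (pv_class_lower cs K C i hn hi hall)

-- ===== VERDICT (by name: the statement is the Claim_ definition above) =====
theorem min_changes_to_divide_string_spec : Claim_equal_min_changes_to_divide_string := by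
  intro s k _hdom hpre
  unfold Spec_min_changes_to_divide_string
  obtain ⟨hk0, hlow⟩ := hpre
  unfold min_changes_to_divide_string min_changes_to_divide_string_alt
  set cs := s.toList with hcs
  simp only [PySem.List.len_eq]
  by_cases hmod : PySem.Int.mod ((cs.length : Int)) k = 0
  · rw [if_neg (by simp [hmod]), if_neg (by simp [hmod])]
    by_cases hk : 1 ≤ k
    · -- positive k
      obtain ⟨K, rfl⟩ : ∃ K : Nat, k = (K : Int) :=
        ⟨k.toNat, (Int.toNat_of_nonneg (by omega)).symm⟩
      have hK1 : 1 ≤ K := by exact_mod_cast hk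
      have hdvd : K ∣ cs.length := by
        have := (PySem.Int.mod_eq_zero_iff_dvd _ _).mp hmod
        exact_mod_cast this
      set C : Nat := cs.length / K with hC
      have hn : cs.length = C * K := (Nat.div_mul_cancel hdvd).symm
      have hall : cs.all (fun c => 97 ≤ c.toNat && c.toNat ≤ 122) = true := hlow hmod hk
      have hcc : PySem.Int.floordiv ((cs.length : Nat) : Int) (K : Int) = (C : Int) := by
        rw [PySem.Int.floordiv_natCast]
      rw [hcc]
      -- A's outer loop over range(k)
      have hrangeK : PySem.List.pyRange 0 (K : Int) 1 =
          (List.range K).map (fun (i : Nat) => (i : Int)) := by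
        rw [PySem.List.pyRange_one]
        simp
      rw [hrangeK, List.foldl_map]
      -- B's chunks
      have hchunks : (PySem.List.pyRange 0 (C : Int) 1).map
          (fun t => PySem.List.slice cs (some (t * (K : Int))) (some ((t + 1) * (K : Int)))) =
          (List.range C).map (fun (t : Nat) => (cs.drop (t * K)).take K) := by
        rw [PySem.List.pyRange_one]
        simp only [Int.sub_zero, Int.toNat_natCast, List.map_map]
        apply List.map_congr_left
        intro t _
        simp only [Function.comp]
        have h1 : (0 + (t : Int)) * (K : Int) = ((t * K : Nat) : Int) := by push_cast; ring
        have h2 : (0 + (t : Int) + 1) * (K : Int) = ((t * K : Nat) : Int) + ((K : Nat) : Int) := by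
          push_cast; ring
        rw [h1, h2, PySem.List.slice_natCast_add]
      rw [hchunks]
      rcases Nat.eq_zero_or_pos C with hC0 | hCpos
      · -- empty string: every class is empty and there are no chunks
        have hcs0 : cs.length = 0 := by rw [hn, hC0]; ring
        rw [hC0]
        simp only [List.range_zero, List.map_nil]
        rw [pv_zip_nil]
        simp only [List.foldl_nil]
        have hempty : ∀ i : Nat, PySem.List.pyRange (i : Int) ((cs.length : Int)) (K : Int) = [] := by
          intro i
          rw [PySem.List.pyRange_of_pos _ _ (by exact_mod_cast hK1 : (0 : Int) < (K : Int))]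
          rw [if_neg (by rw [hcs0]; push_cast; omega)]
          simp
        have hmax0 : PySem.List.maxD (List.replicate 26 (0 : Int)) (fun x => x) 0 = 0 := by decide
        have hf : (fun (x : Int) (y : Nat) => x + (((0 : Nat) : Int) - PySem.List.maxD
              (List.foldl (pvStep cs) (List.replicate 26 0)
                (PySem.List.pyRange (y : Int) ((cs.length : Int)) (K : Int))) (fun x => x) 0)) =
            (fun (x : Int) (_ : Nat) => x) := by
          funext x y
          rw [hempty y]
          simp only [List.foldl_nil, hmax0]
          omega
        rw [hf, PySem.List.foldl_ignore]

      · -- nonempty: zip of the C equal-length chunks is the list of K classes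
        have hlen : ∀ t : Nat, t < C → ((cs.drop (t * K)).take K).length = K := by
          intro t ht
          have hmul : (t + 1) * K ≤ C * K := Nat.mul_le_mul_right K ht
          have hexp : (t + 1) * K = t * K + K := by ring
          simp only [List.length_take, List.length_drop]
          omega
        have hzip : pvZip ((List.range C).map (fun (t : Nat) => (cs.drop (t * K)).take K)) =
            (List.range K).map (fun i =>
              ((List.range C).map (fun (t : Nat) => (cs.drop (t * K)).take K)).map
                (fun t => t.getD i 'a')) := by
          apply pv_zip_const
          · intro h
            rw [List.map_eq_nil_iff, List.range_eq_nil] at h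
            omega
          · intro x hx
            obtain ⟨t, ht, rfl⟩ := List.mem_map.mp hx
            exact hlen t (List.mem_range.mp ht)
        rw [hzip]
        have hcol : ∀ i : Nat, i < K →
            ((List.range C).map (fun (t : Nat) => (cs.drop (t * K)).take K)).map
              (fun t => t.getD i 'a') = pvClass cs K C i := by
          intro i hi
          rw [List.map_map]
          apply List.map_congr_left
          intro t ht
          rw [List.mem_range] at ht
          have hmul : (t + 1) * K ≤ C * K := Nat.mul_le_mul_right K ht
          have hexp : (t + 1) * K = t * K + K := by ring
          have hidx : t * K + i < cs.length := by omega
          have hlt : i < ((cs.drop (t * K)).take K).length := by rw [hlen t ht]; exact hi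
          show ((cs.drop (t * K)).take K).getD i 'a' = cs.getD (t * K + i) 'a'
          rw [List.getD_eq_getElem _ _ hlt, List.getD_eq_getElem _ _ hidx]
          rw [List.getElem_take, List.getElem_drop]
        rw [List.foldl_map]
        apply PySem.List.foldl_congr_mem
        intro acc i hi
        rw [List.mem_range] at hi
        rw [pv_termA cs K C i hK1 hi hn hall, hcol i hi, pv_best_sorted]
    · -- negative k: both folds run over the empty list, both results are 0
      have hkneg : k ≤ -1 := by omega
      rw [PySem.List.pyRange_one_eq_nil (by omega : k ≤ 0)]
      have hfm := PySem.Int.floordiv_mul_add_mod ((cs.length : Nat) : Int) k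
      rw [hmod, add_zero] at hfm
      have hn0 : (0 : Int) ≤ ((cs.length : Nat) : Int) := by positivity
      have hcc0 : PySem.Int.floordiv ((cs.length : Nat) : Int) k ≤ 0 := by nlinarith [hfm]
      rw [PySem.List.pyRange_one_eq_nil (by omega : PySem.Int.floordiv ((cs.length : Nat) : Int) k ≤ 0)]
      rw [List.map_nil, pv_zip_nil]
      simp only [List.foldl_nil]
  · rw [if_pos (by simp [hmod]), if_pos (by simp [hmod])]
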